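-- pv_equiv track=rewrite | github.com/CSC-101/lab-5-icagnoni | lab5.py | largest_between
-- ===== SOURCE A (Python) =====
-- from typing import Optional
--
-- def largest_between(lst: list[int], lower: int, upper: int) -> Optional[int]:
--     if lower > upper:
--         return None
--     if lower < 0:
--         lower = 0
--     if upper >= len(lst):
--         upper = len(lst) - 1
--     if lower > upper:
--         return None
--     largest_index = lower
--     for n in range(lower, upper + 1):
--         if lst[n] > lst[largest_index]:
--             largest_index = n
--
--     return largest_index
-- ===== SOURCE B (Python) =====
-- def largest_between(lst: list, lower: int, upper: int):
--     if lower > upper: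
--         return None
--     lower = max(lower, 0)
--     upper = min(upper, len(lst) - 1)
--     if lower > upper:
--         return None
--     sub = lst[lower:upper + 1]
--     return lower + sub.index(max(sub))
-- ===== Notes on version B (the rewrite author's own statement) =====
-- stated objective: simpler
-- what changed: Replaces the running-argmax index loop with a slice-then-locate decomposition: take the sub-list, compute its maximum value with max(), and find its first position with list.index(), clamping via max/min instead of conditionals.
import Mathlib
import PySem

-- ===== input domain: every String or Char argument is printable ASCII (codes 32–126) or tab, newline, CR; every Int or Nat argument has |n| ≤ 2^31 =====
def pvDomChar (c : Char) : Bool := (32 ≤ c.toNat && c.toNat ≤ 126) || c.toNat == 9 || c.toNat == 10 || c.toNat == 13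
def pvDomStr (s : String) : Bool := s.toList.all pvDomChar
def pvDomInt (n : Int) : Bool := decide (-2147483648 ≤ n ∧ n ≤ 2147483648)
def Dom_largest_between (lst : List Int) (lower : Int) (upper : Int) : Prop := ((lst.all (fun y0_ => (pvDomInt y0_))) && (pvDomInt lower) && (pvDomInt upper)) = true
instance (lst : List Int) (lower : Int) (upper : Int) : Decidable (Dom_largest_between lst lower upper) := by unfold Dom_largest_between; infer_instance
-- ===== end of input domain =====

-- B replaces A's single running-argmax loop by a slice / max() / list.index decomposition (objective: simpler).

-- ===== PORT A =====
-- After the clamping, every index n and largest_index is in range, so the pyGetD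
-- default 0 is never read (Python-exact there).
def largest_between (lst : List Int) (lower : Int) (upper : Int) : Option Int :=
  if lower > upper then none
  else
    let lower' := if lower < 0 then 0 else lower
    let upper' := if upper ≥ (lst.length : Int) then (lst.length : Int) - 1 else upper
    if lower' > upper' then none
    else
      some ((PySem.List.pyRange lower' (upper' + 1) 1).foldl
        (fun li n => if PySem.List.pyGetD lst n 0 > PySem.List.pyGetD lst li 0 then n else li)
        lower')

-- ===== PORT B =====
def largest_between_alt (lst : List Int) (lower : Int) (upper : Int) : Option Int :=
  if lower > upper then none
  else
    let lower' := max lower 0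
    let upper' := min upper ((lst.length : Int) - 1)
    if lower' > upper' then none
    else
      let sub := PySem.List.slice lst (some lower') (some (upper' + 1))
      match PySem.List.max? sub (fun x => x) with
      | none => none
      | some m =>
        match PySem.List.index? sub m with
        | none => none
        | some i => some (lower' + (i : Int))

-- ===== PRECONDITION & SPEC =====
def Spec_largest_between (lst : List Int) (lower : Int) (upper : Int) (out : Option Int) : Prop := out = largest_between_alt lst lower upper
instance (lst : List Int) (lower : Int) (upper : Int) (out : Option Int) : Decidable (Spec_largest_between lst lower upper out) := by unfold Spec_largest_between; infer_instance

-- ===== CLAIM (what is proved, stated in full; the proofs are below) =====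
def Claim_equal_largest_between : Prop := ∀ (lst : List Int) (lower : Int) (upper : Int), Dom_largest_between lst lower upper → Spec_largest_between lst lower upper (largest_between lst lower upper)

-- ===== LEMMAS AND PROOFS =====

-- Invariant of A's loop over range(l, l+k+1): the final state is l + j where j is the
-- index of the first occurrence of the maximum M of the slice lst[l : l+k+1].
theorem lb_main (lst : List Int) (l : Int) (hl : 0 ≤ l) :
    ∀ k : Nat, l + k < (lst.length : Int) →
    ∃ (j : Nat) (M : Int),
      (PySem.List.pyRange l (l + k + 1) 1).foldl
        (fun li n => if PySem.List.pyGetD lst n 0 > PySem.List.pyGetD lst li 0 then n else li) l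
        = l + j
      ∧ PySem.List.max? (PySem.List.slice lst (some l) (some (l + k + 1))) (fun x => x) = some M
      ∧ PySem.List.index? (PySem.List.slice lst (some l) (some (l + k + 1))) M = some j
      ∧ j ≤ k
      ∧ PySem.List.pyGetD lst (l + j) 0 = M := by
  intro k
  induction k with
  | zero =>
    intro hlen
    simp only [Nat.cast_zero, add_zero]
    have hlen' : l.toNat < lst.length := by omega
    have hslice : PySem.List.slice lst (some l) (some (l + 1))
        = [lst[l.toNat]] := by
      rw [PySem.List.slice_toNat lst hl (by omega)]
      have h1 : (l + 1).toNat - l.toNat = 1 := by omega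
      rw [h1, List.drop_eq_getElem_cons hlen', List.take_succ_cons, List.take_zero]
    refine ⟨0, lst[l.toNat], ?_, ?_, ?_, le_refl _, ?_⟩
    · rw [PySem.List.pyRange_one_singleton]
      simp
    · rw [hslice, PySem.List.max?_id_cons]; simp
    · rw [hslice]; exact PySem.List.index?_cons_self _ _
    · rw [PySem.List.pyGetD_eq_getElem lst 0 (by omega) (by omega)]
      congr 1; omega
  | succ k ih =>
    intro hlen
    obtain ⟨j, M, hfold, hmax, hidx, hj, hM⟩ := ih (by omega)
    have hnl : l.toNat + k + 1 < lst.length := by omega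
    set a : Int := lst[l.toNat + k + 1] with ha_def
    have hcast1 : l + ((k:Nat)+1:Nat) + 1 = (l + k + 1) + 1 := by push_cast; ring
    have hcast2 : l + ((k:Nat)+1:Nat) = l + k + 1 := by push_cast; ring
    have hsliceK : PySem.List.slice lst (some l) (some (l + k + 1))
        = (lst.drop l.toNat).take (k+1) := by
      rw [PySem.List.slice_toNat lst hl (by omega)]
      congr 1; omega
    have hlenK : ((lst.drop l.toNat).take (k+1)).length = k+1 := by
      simp [List.length_take, List.length_drop]; omega
    have hgetK1 : (lst.drop l.toNat)[k+1]? = some a := by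
      rw [List.getElem?_drop, List.getElem?_eq_getElem (by omega)]
      rfl
    have hsliceS : PySem.List.slice lst (some l) (some (l + ((k:Nat)+1:Nat) + 1))
        = (lst.drop l.toNat).take (k+1) ++ [a] := by
      rw [hcast1, PySem.List.slice_toNat lst hl (by omega)]
      have h1 : (l + k + 1 + 1).toNat - l.toNat = k + 2 := by omega
      rw [h1, List.take_add_one, hgetK1]
      rfl
    rw [hsliceK] at hmax hidx
    obtain ⟨x, t, hxt⟩ : ∃ x t, (lst.drop l.toNat).take (k+1) = x :: t := by
      cases h : (lst.drop l.toNat).take (k+1) with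
      | nil => rw [h] at hlenK; simp at hlenK
      | cons x t => exact ⟨x, t, rfl⟩
    have hMval : t.foldl max x = M := by
      rw [hxt, PySem.List.max?_id_cons] at hmax
      exact Option.some_injective _ hmax
    have hmax' : PySem.List.max? ((lst.drop l.toNat).take (k+1) ++ [a]) (fun y => y)
        = some (max M a) := by
      rw [hxt]
      show PySem.List.max? (x :: (t ++ [a])) (fun y => y) = _
      rw [PySem.List.max?_id_cons, List.foldl_append, hMval]
      simp
    have hMmem : M ∈ (lst.drop l.toNat).take (k+1) := by
      have h := (PySem.List.index?_isSome_iff ((lst.drop l.toNat).take (k+1)) M).mp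
      rw [hidx] at h; simpa using h (by simp)
    have hfold' : (PySem.List.pyRange l (l + ((k:Nat)+1:Nat) + 1) 1).foldl
        (fun li n => if PySem.List.pyGetD lst n 0 > PySem.List.pyGetD lst li 0 then n else li) l
        = (if PySem.List.pyGetD lst (l+k+1) 0 > PySem.List.pyGetD lst (l+j) 0 then l+k+1 else l+j) := by
      rw [hcast1, PySem.List.pyRange_one_succ_right (by omega), List.foldl_append, hfold]
      simp
    have hga : PySem.List.pyGetD lst (l+k+1) 0 = a := by
      rw [PySem.List.pyGetD_eq_getElem lst 0 (by omega) (by omega)]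
      congr 1; omega
    by_cases hcmp : M < a
    · refine ⟨k+1, a, ?_, ?_, ?_, le_refl _, ?_⟩
      · rw [hfold', hga, hM, if_pos hcmp, hcast2]
      · rw [hsliceS, hmax']; congr 1; omega
      · rw [hsliceS]
        have hanotin : a ∉ (lst.drop l.toNat).take (k+1) := by
          intro hmem
          have h := PySem.List.max?_isMax (key := fun y => y) hmax a hmem
          simp at h; omega
        rw [PySem.List.index?_append_singleton_self _ a hanotin, hlenK]
      · rw [hcast2]; exact hga
    · refine ⟨j, M, ?_, ?_, ?_, by omega, ?_⟩
      · rw [hfold', hga, hM, if_neg (by omega)]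
      · rw [hsliceS, hmax']; congr 1; omega
      · rw [hsliceS, PySem.List.index?_append_of_mem _ hMmem, hidx]
      · exact hM

theorem lb_eq (lst : List Int) (lower upper : Int) :
    largest_between lst lower upper = largest_between_alt lst lower upper := by
  unfold largest_between largest_between_alt
  by_cases h1 : lower > upper
  · simp [h1]
  · simp only [h1, if_false]
    have hcl : (if lower < 0 then 0 else lower) = max lower 0 := by
      split_ifs with h <;> omega
    have hcu : (if upper ≥ (lst.length : Int) then (lst.length : Int) - 1 else upper)
        = min upper ((lst.length : Int) - 1) := by
      split_ifs with h <;> omega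
    rw [hcl, hcu]
    set l := max lower 0 with hl_def
    set u := min upper ((lst.length : Int) - 1) with hu_def
    by_cases h2 : l > u
    · simp [h2]
    · simp only [h2, if_false]
      have hl0 : 0 ≤ l := by omega
      have hu' : u < (lst.length : Int) := by
        have : ¬ upper < lower := h1
        omega
      have hlu : l ≤ u := by omega
      set k := (u - l).toNat with hk_def
      have hku : u = l + (k : Int) := by omega
      have hkl : l + (k : Int) < (lst.length : Int) := by omega
      obtain ⟨j, M, hfold, hmax, hidx, hj, hM⟩ := lb_main lst l hl0 k hkl
      rw [hku, hfold, hmax]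
      simp only [hidx]

-- ===== VERDICT (by name: the statement is the Claim_ definition above) =====
theorem largest_between_spec : Claim_equal_largest_between := by
  intro lst lower upper _
  unfold Spec_largest_between
  exact lb_eq lst lower upper
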